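-- pv_equiv track=rewrite | github.com/MrBrantCode/unitest_baseline | mut_generate/mist_train_cf/cf_86798/solution.py | find_subsequence_index
-- ===== SOURCE A (Python) =====
-- def find_subsequence_index(string, num):
--     digits = [int(d) for d in str(num)]
--     i = 0
--     j = 0
--     while i < len(string) and j < len(digits):
--         if string[i] == str(digits[j]):
--             i += 1
--             j += 1
--         else:
--             i += 1
--     if j == len(digits):
--         return i - len(digits)
--     else:
--         return -1
-- ===== SOURCE B (Python) =====
-- def find_subsequence_index(string, num):
--     digits = [int(d) for d in str(num)]
--     n = len(string)
--     # subsequence automaton: nxt[i] maps a character to the smallest index k >= i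
--     # with string[k] == that character; built right-to-left in one pass.
--     nxt = [dict() for _ in range(n + 1)]
--     for i in range(n - 1, -1, -1):
--         nxt[i] = dict(nxt[i + 1])
--         nxt[i][string[i]] = i
--     pos = 0
--     for d in digits:
--         k = nxt[pos].get(str(d))
--         if k is None:
--             return -1
--         pos = k + 1
--     return pos - len(digits)
-- ===== Notes on version B (the rewrite author's own statement) =====
-- stated objective: alternative
-- what changed: A matches the digits online with a two-pointer character scan; B first precomputes a subsequence automaton (for every position a next-occurrence table mapping each character to its smallest index >= that position, built right-to-left), then answers each digit by one table lookup and jump.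
import Mathlib
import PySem

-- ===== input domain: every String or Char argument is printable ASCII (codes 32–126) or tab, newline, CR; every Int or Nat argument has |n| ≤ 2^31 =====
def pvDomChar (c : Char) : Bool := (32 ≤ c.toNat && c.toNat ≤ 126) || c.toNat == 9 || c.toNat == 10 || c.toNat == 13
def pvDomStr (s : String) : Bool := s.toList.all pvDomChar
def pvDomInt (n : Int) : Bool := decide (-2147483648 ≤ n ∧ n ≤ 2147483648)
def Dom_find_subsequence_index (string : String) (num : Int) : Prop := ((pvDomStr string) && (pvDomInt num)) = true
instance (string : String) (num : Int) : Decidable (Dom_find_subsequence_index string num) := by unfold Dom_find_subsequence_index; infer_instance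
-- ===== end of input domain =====

-- B replaces A's online two-pointer character scan by a subsequence automaton:
-- it precomputes, right-to-left, a next-occurrence table for every position of the
-- string and then answers each digit by one table lookup (objective: alternative).
-- Pre_ excludes num < 0, on which A (and B alike) raises ValueError via int('-').

-- ===== PORT A =====
-- the while loop of A: state (i, j), scanning string char by char
def findSubseqLoopA (s : List Char) (ds : List Int) (i j : Nat) : Nat × Nat :=
  if h : i < s.length ∧ j < ds.length then
    if [s[i]'h.1] = PySem.Int.toChars (ds[j]'h.2) then  -- string[i] == str(digits[j])
      findSubseqLoopA s ds (i + 1) (j + 1)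
    else
      findSubseqLoopA s ds (i + 1) j
  else (i, j)
termination_by s.length - i

def find_subsequence_index (string : String) (num : Int) : Int :=
  -- digits = [int(d) for d in str(num)]; the none branch is Python's ValueError (excluded by Pre_)
  match (PySem.Int.toStr num).toList.mapM (fun c => PySem.Int.ofStr? (String.ofList [c])) with
  | none => -1
  | some digits =>
    let p := findSubseqLoopA string.toList digits 0 0
    if p.2 = digits.length then (p.1 : Int) - digits.length else -1

-- ===== PORT B =====
-- the backward build loop of B: nxt[i] = dict(nxt[i+1]); nxt[i][string[i]] = i,
-- transliterated as structural recursion producing the tables for the suffix at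
-- absolute offset i (same intermediate dictionaries, built back to front)
def buildNxt (s : List Char) (i : Nat) : List (PySem.Dict String Int) :=
  match s with
  | [] => [PySem.Dict.empty]
  | c :: rest =>
    let t := buildNxt rest (i + 1)
    (PySem.Dict.insert (t.headD PySem.Dict.empty) (String.ofList [c]) (i : Int)) :: t

-- the query loop of B: k = nxt[pos].get(str(d)); pos = k + 1
-- (pos is always ≤ len(string), so the indexing never raises; .getD matches that)
def walkNxt (nxt : List (PySem.Dict String Int)) (ds : List Int) (pos : Nat) : Option Nat :=
  match ds with
  | [] => some pos
  | d :: rest =>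
    match PySem.Dict.get? (nxt[pos]?.getD PySem.Dict.empty) (PySem.Int.toStr d) with
    | none => none
    | some k => walkNxt nxt rest (k.toNat + 1)  -- stored values are nonneg indices

def find_subsequence_index_alt (string : String) (num : Int) : Int :=
  -- digits = [int(d) for d in str(num)]; the none branch is Python's ValueError (excluded by Pre_)
  match (PySem.Int.toStr num).toList.mapM (fun c => PySem.Int.ofStr? (String.ofList [c])) with
  | none => -1
  | some digits =>
    let nxt := buildNxt string.toList 0
    match walkNxt nxt digits 0 with
    | none => -1
    | some pos => (pos : Int) - digits.length

-- ===== PRECONDITION & SPEC =====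
-- Pre_ excludes exactly num < 0: there str(num) starts with '-' and int('-') raises ValueError in both A and B.
def Pre_find_subsequence_index (string : String) (num : Int) : Prop := 0 ≤ num
instance (string : String) (num : Int) : Decidable (Pre_find_subsequence_index string num) := by unfold Pre_find_subsequence_index; infer_instance

def pvWitness_find_subsequence_index : String × Int := ("a1b2c", 12)

def Spec_find_subsequence_index (string : String) (num : Int) (out : Int) : Prop := out = find_subsequence_index_alt string num
instance (string : String) (num : Int) (out : Int) : Decidable (Spec_find_subsequence_index string num out) := by unfold Spec_find_subsequence_index; infer_instance

-- ===== CLAIM (what is proved, stated in full; the proofs are below) =====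
def Claim_equal_find_subsequence_index : Prop := ∀ (string : String) (num : Int), Dom_find_subsequence_index string num → Pre_find_subsequence_index string num → Spec_find_subsequence_index string num (find_subsequence_index string num)

-- ===== LEMMAS AND PROOFS =====

-- every character produced by Nat.toDigitsCore base 10 is a digit character
theorem toDigitsCore_digitChar : ∀ (f n : Nat) (l : List Char),
    (∀ c ∈ l, ∃ k, k < 10 ∧ c = Nat.digitChar k) →
    ∀ c ∈ Nat.toDigitsCore 10 f n l, ∃ k, k < 10 ∧ c = Nat.digitChar k := by
  intro f
  induction f with
  | zero => intro n l hl; simpa [Nat.toDigitsCore] using hl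
  | succ f ih =>
    intro n l hl c hc
    simp only [Nat.toDigitsCore] at hc
    by_cases h : n / 10 = 0
    · rw [if_pos h] at hc
      rcases List.mem_cons.mp hc with hc | hc
      · exact ⟨n % 10, Nat.mod_lt _ (by norm_num), hc⟩
      · exact hl c hc
    · rw [if_neg h] at hc
      refine ih (n / 10) ((n % 10).digitChar :: l) ?_ c hc
      intro c' hc'
      rcases List.mem_cons.mp hc' with hc' | hc'
      · exact ⟨n % 10, Nat.mod_lt _ (by norm_num), hc'⟩
      · exact hl c' hc'

-- concrete facts about single-digit values
theorem digit_facts (k : Nat) (hk : k < 10) :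
    PySem.Int.ofStr? (String.ofList [Nat.digitChar k]) = some (k : Int) ∧
    PySem.Int.toChars ((k : Nat) : Int) = [Nat.digitChar k] := by
  interval_cases k <;> exact ⟨by decide, by decide⟩

-- mapping int() over a list of digit characters succeeds, and each result prints as one character
theorem mapM_digit_chars : ∀ (cs : List Char),
    (∀ c ∈ cs, ∃ k, k < 10 ∧ c = Nat.digitChar k) →
    ∃ ds : List Int, cs.mapM (fun c => PySem.Int.ofStr? (String.ofList [c])) = some ds ∧
      ∀ d ∈ ds, ∃ c', PySem.Int.toChars d = [c'] := by
  intro cs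
  induction cs with
  | nil => intro _; exact ⟨[], by simp, by simp⟩
  | cons c cs ih =>
    intro h
    obtain ⟨k, hk, hc⟩ := h c (List.mem_cons_self ..)
    obtain ⟨ds, hds, hds1⟩ := ih (fun c' hc' => h c' (List.mem_cons_of_mem _ hc'))
    refine ⟨(k : Int) :: ds, ?_, ?_⟩
    · rw [List.mapM_cons, hc, (digit_facts k hk).1, hds]; rfl
    · intro d hd
      rcases List.mem_cons.mp hd with hd | hd
      · exact ⟨Nat.digitChar k, by rw [hd]; exact (digit_facts k hk).2⟩
      · exact hds1 d hd

-- under Pre_, str(num) consists of digit characters only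
theorem toChars_nonneg_digits (num : Int) (h : 0 ≤ num) :
    ∀ c ∈ PySem.Int.toChars num, ∃ k, k < 10 ∧ c = Nat.digitChar k := by
  unfold PySem.Int.toChars
  rw [if_neg (by omega)]
  exact toDigitsCore_digitChar _ _ [] (by simp)

-- mathematical yardstick: the first index k ≥ j with s[k] = c
def firstIdxFrom (s : List Char) (j : Nat) (c : Char) : Option Nat :=
  if h : j < s.length then
    if s[j] = c then some j else firstIdxFrom s (j + 1) c
  else none
termination_by s.length - j

theorem firstIdxFrom_shift (a : Char) (l : List Char) (c : Char) :
    ∀ j, firstIdxFrom (a :: l) (j + 1) c = (firstIdxFrom l j c).map (· + 1) := by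
  intro j
  induction hm : l.length - j using Nat.strong_induction_on generalizing j with
  | _ m ih =>
  conv_lhs => rw [firstIdxFrom]
  conv_rhs => rw [firstIdxFrom]
  by_cases h : j < l.length
  · rw [dif_pos (show j + 1 < (a :: l).length by simp; omega), dif_pos h]
    have hg : (a :: l)[j + 1]'(by simp; omega) = l[j]'h := by simp
    rw [hg]
    by_cases hc : l[j]'h = c
    · simp [hc]
    · rw [if_neg hc, if_neg hc, ih (l.length - (j + 1)) (by omega) (j + 1) rfl]
  · rw [dif_neg (show ¬ j + 1 < (a :: l).length by simp; omega), dif_neg h]; rfl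

theorem buildNxt_headD (s : List Char) (i : Nat) :
    (buildNxt s i).headD PySem.Dict.empty = (buildNxt s i)[0]?.getD PySem.Dict.empty := by
  cases s <;> simp [buildNxt]

-- the built tables look up exactly the first occurrence from their position
theorem buildNxt_lookup : ∀ (s : List Char) (i j : Nat) (c : Char), j ≤ s.length →
    PySem.Dict.get? ((buildNxt s i)[j]?.getD PySem.Dict.empty) (String.ofList [c]) =
      (firstIdxFrom s j c).map (fun k => ((i + k : Nat) : Int)) := by
  intro s
  induction s with
  | nil =>
    intro i j c hj
    have hj0 : j = 0 := by simpa using hj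
    subst hj0
    rw [firstIdxFrom]
    simp [buildNxt]
  | cons c' rest ih =>
    intro i j c hj
    match j with
    | 0 =>
      simp only [buildNxt, List.getElem?_cons_zero, Option.getD_some]
      rw [firstIdxFrom, dif_pos (by simp)]
      by_cases hc : c = c'
      · subst hc
        rw [PySem.Dict.get?_insert_self]
        simp
      · have hkey : String.ofList [c] ≠ String.ofList [c'] := by
          intro h
          have := congrArg String.toList h
          simp at this
          exact hc this
        rw [PySem.Dict.get?_insert_of_ne _ _ hkey]
        rw [buildNxt_headD]
        rw [ih (i + 1) 0 c (Nat.zero_le _)]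
        have : (c' :: rest)[0]'(by simp) = c' := rfl
        rw [this, if_neg (fun h => hc h.symm)]
        rw [show (0 : Nat) + 1 = 0 + 1 from rfl, firstIdxFrom_shift]
        cases firstIdxFrom rest 0 c <;> simp <;> omega
    | j' + 1 =>
      simp only [buildNxt, List.getElem?_cons_succ]
      rw [ih (i + 1) j' c (by simpa using hj)]
      rw [firstIdxFrom_shift]
      cases firstIdxFrom rest j' c <;> simp <;> omega

-- the bridge: B's automaton walk computes exactly the outcome of A's character scan
theorem loop_bridge (s : List Char) (ds : List Int)
    (hds : ∀ d ∈ ds, ∃ c, PySem.Int.toChars d = [c]) :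
    ∀ (i j : Nat), i ≤ s.length → j ≤ ds.length →
    walkNxt (buildNxt s 0) (ds.drop j) i =
      (fun p : Nat × Nat => if p.2 = ds.length then some p.1 else none)
        (findSubseqLoopA s ds i j) := by
  intro i
  induction hm : s.length - i using Nat.strong_induction_on generalizing i with
  | _ m ih =>
  intro j hi hj
  by_cases hjlen : j = ds.length
  · subst hjlen
    rw [List.drop_length, findSubseqLoopA]
    simp only [lt_irrefl, and_false, dite_false]
    simp [walkNxt]
  · have hjlt : j < ds.length := lt_of_le_of_ne hj hjlen
    have hdropds : ds.drop j = ds[j] :: ds.drop (j + 1) := List.drop_eq_getElem_cons hjlt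
    obtain ⟨c, hc⟩ := hds ds[j] (List.getElem_mem hjlt)
    have hkey : PySem.Int.toStr ds[j] = String.ofList [c] := by
      have h1 := PySem.Int.toList_toStr ds[j]
      rw [hc] at h1
      rw [← h1, String.ofList_toList]
    by_cases hilen : i < s.length
    · rw [findSubseqLoopA, dif_pos (⟨hilen, hjlt⟩ : i < s.length ∧ j < ds.length)]
      by_cases hmatch : [s[i]'hilen] = PySem.Int.toChars (ds[j]'hjlt)
      · have hceq : s[i] = c := by
          rw [hc] at hmatch; exact List.singleton_inj.mp hmatch
        rw [if_pos hmatch, hdropds, walkNxt, hkey]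
        rw [buildNxt_lookup s 0 i c hi]
        rw [firstIdxFrom, dif_pos hilen, if_pos hceq]
        simp only [Option.map_some]
        have h0 : ((0 + i : Nat) : Int).toNat + 1 = i + 1 := by omega
        rw [h0]
        exact ih (s.length - (i + 1)) (by omega) (i + 1) rfl (j + 1) (by omega) hjlt
      · rw [if_neg hmatch]
        have hcne : s[i] ≠ c := fun h => hmatch (by rw [hc, h])
        have hB : walkNxt (buildNxt s 0) (ds.drop j) i
                = walkNxt (buildNxt s 0) (ds.drop j) (i + 1) := by
          rw [hdropds, walkNxt, walkNxt, hkey]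
          rw [buildNxt_lookup s 0 i c hi, buildNxt_lookup s 0 (i + 1) c (by omega)]
          rw [show firstIdxFrom s i c = firstIdxFrom s (i + 1) c from by
            rw [firstIdxFrom, dif_pos hilen, if_neg hcne]]
        rw [hB]
        exact ih (s.length - (i + 1)) (by omega) (i + 1) rfl j (by omega) hj
    · have hieq : i = s.length := le_antisymm hi (not_lt.mp hilen)
      rw [findSubseqLoopA]
      simp only [hilen, false_and, dite_false]
      simp only [hjlen, if_false]
      rw [hdropds, walkNxt, hkey]
      rw [buildNxt_lookup s 0 i c hi]
      rw [firstIdxFrom, dif_neg (by omega)]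
      rfl

-- ===== VERDICT (by name: the statement is the Claim_ definition above) =====
theorem find_subsequence_index_spec : Claim_equal_find_subsequence_index := by
  intro string num _ hpre
  unfold Spec_find_subsequence_index find_subsequence_index find_subsequence_index_alt
  obtain ⟨ds, hmap, hds⟩ := mapM_digit_chars (PySem.Int.toStr num).toList
    (by rw [PySem.Int.toList_toStr]; exact toChars_nonneg_digits num hpre)
  rw [hmap]
  have hbridge := loop_bridge string.toList ds hds 0 0 (Nat.zero_le _) (Nat.zero_le _)
  rw [List.drop_zero] at hbridge
  show (let p := findSubseqLoopA string.toList ds 0 0;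
        if p.2 = ds.length then (p.1 : Int) - ds.length else -1)
     = (match walkNxt (buildNxt string.toList 0) ds 0 with
        | none => -1
        | some pos => (pos : Int) - ds.length)
  rw [hbridge]
  obtain ⟨i', j'⟩ := findSubseqLoopA string.toList ds 0 0
  by_cases hj : j' = ds.length
  · simp [hj]
  · simp [hj]
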